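-- pv_equiv track=rewrite | github.com/vHaYoungv/Algorithm | 프로그래머스/연습문제/튜플.py | solution
-- ===== SOURCE A (Python) =====
-- def solution(s):
--     answer = []
--     s = s.lstrip('{').rstrip('}') #문자열에서 리스트로?
--     lst = s.split('},{')
--     lst.sort(key=lambda x:len(x))
--     for lst in [list(map(int, x.split(','))) for x in lst]:
--         s = set(lst)
--         answer.append(list(s-set(answer))[0])
--     return answer
-- ===== SOURCE B (Python) =====
-- def solution(s):
--     # Count, for each element, how many of the subsets contain it (deduplicating
--     # inside each subset), then list the distinct elements by descending count.
--     cnt = {}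
--     for tok in s.lstrip('{').rstrip('}').split('},{'):
--         for x in dict.fromkeys(int(p) for p in tok.split(',')):
--             cnt[x] = cnt.get(x, 0) + 1
--     return sorted(cnt, key=lambda x: -cnt[x])
-- ===== Notes on version B (the rewrite author's own statement) =====
-- stated objective: alternative
-- what changed: B drops A's sort-by-length plus incremental set-difference peeling and instead counts, in one pass over the (unsorted) subsets, how many subsets contain each element, returning the distinct elements ordered by descending containment count.
-- outside the precondition, e.g. on solution('2,1'): A returns [1], B returns [2, 1]
import Mathlib
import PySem

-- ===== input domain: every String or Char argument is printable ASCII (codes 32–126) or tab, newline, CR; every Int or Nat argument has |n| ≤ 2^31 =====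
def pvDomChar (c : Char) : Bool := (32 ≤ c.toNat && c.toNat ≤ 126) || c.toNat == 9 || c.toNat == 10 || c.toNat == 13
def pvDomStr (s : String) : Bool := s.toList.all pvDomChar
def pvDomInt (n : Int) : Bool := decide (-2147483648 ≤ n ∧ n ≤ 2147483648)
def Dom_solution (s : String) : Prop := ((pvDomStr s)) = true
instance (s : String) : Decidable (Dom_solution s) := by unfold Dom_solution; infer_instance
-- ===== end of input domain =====

-- B replaces A's sort-by-length + set-difference peeling by a single frequency
-- count (how many subsets contain each element) and orders the distinct elements
-- by descending count (objective: alternative algorithm, similar cost).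

-- s.lstrip('{') / s.rstrip('}') with an explicit char set: hand port, exact
-- (PySem has no single-side stripChars); drop that char from the left / right end.
def pvLStripBrace (cs : List Char) : List Char := cs.dropWhile (· == '{')
def pvRStripBrace (cs : List Char) : List Char := (cs.reverse.dropWhile (· == '}')).reverse

-- int(p) for every piece of x.split(','); `getD 0` is only reached where
-- Python raises ValueError — those inputs are excluded by Pre_solution.
def pvParse (t : String) : List Int :=
  ((PySem.Str.split? t ",").getD []).map (fun p => (PySem.Int.ofStr? p).getD 0)

-- ===== PORT A =====
def solution (s : String) : List Int :=
  -- s = s.lstrip('{').rstrip('}'); lst = s.split('},{'); lst.sort(key=len)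
  let core : String := String.ofList (pvRStripBrace (pvLStripBrace s.toList))
  let toks : List String := (PySem.Str.split? core "},{").getD []
  let toks := PySem.List.sorted toks (fun t => PySem.Str.len t) false
  -- for lst in [list(map(int, x.split(','))) for x in lst]:
  --     answer.append(list(set(lst) - set(answer))[0])
  -- `list(set - set)[0]`: Set.diff keeps first-insertion order, not CPython's hash
  -- order, and `getD ... 0` stands for the IndexError — both exact only where the
  -- difference is a singleton, which Pre_solution guarantees.
  (toks.map pvParse).foldl
    (fun answer l =>
      answer ++ [PySem.List.pyGetD (PySem.Set.diff (PySem.Set.ofList l) (PySem.Set.ofList answer)) 0 0])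
    []

-- ===== PORT B =====
def solution_alt (s : String) : List Int :=
  let toks : List String :=
    (PySem.Str.split? (String.ofList (pvRStripBrace (pvLStripBrace s.toList))) "},{").getD []
  -- for tok in toks: for x in dict.fromkeys(parse(tok)): cnt[x] = cnt.get(x,0)+1
  let cnt : PySem.Dict Int Int :=
    toks.foldl
      (fun d tok => (PySem.List.dedup (pvParse tok)).foldl
        (fun d x => d.insert x (d.getD x 0 + 1)) d)
      PySem.Dict.empty
  -- sorted(cnt, key=lambda x: -cnt[x]); cnt[x] is total on the keys, so getD 0 is exact
  PySem.List.sorted cnt.keys (fun x => -(cnt.getD x 0)) false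

-- ===== PRECONDITION & SPEC =====
-- Pre_ admits exactly the well-formed inputs this exercise is about: every piece
-- parses as an int (else A raises ValueError) and, after A's sort by token length,
-- the denoted sets form a strict chain with cardinalities 1,2,…,n.  Outside that
-- shape A either raises IndexError (a duplicated subset) or silently DROPS elements
-- and picks a CPython-hash-order representative (e.g. "2,1" → [1]) — an accidental
-- order no re-implementation can be specified to match.
def Pre_solution (s : String) : Prop :=
  let toks := (PySem.Str.split? (String.ofList (pvRStripBrace (pvLStripBrace s.toList))) "},{").getD []
  let L := (PySem.List.sorted toks (fun t => PySem.Str.len t) false).map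
    (fun t => PySem.Set.ofList (pvParse t))
  (∀ t ∈ toks, ∀ p ∈ (PySem.Str.split? t ",").getD [], (PySem.Int.ofStr? p).isSome = true)
  ∧ (∀ k, (h : k < L.length) → (L[k]).length = k + 1)
  ∧ (∀ k, (h : k < L.length) → ∀ j, (hj : j ≤ k) → ∀ x, x ∈ L[j]'(by omega) → x ∈ L[k])
instance (s : String) : Decidable (Pre_solution s) := by unfold Pre_solution; infer_instance

def pvWitness_solution : String := "{{2},{2,1}}"

def Spec_solution (s : String) (out : List Int) : Prop := out = solution_alt s
instance (s : String) (out : List Int) : Decidable (Spec_solution s out) := by unfold Spec_solution; infer_instance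

-- ===== CLAIM (what is proved, stated in full; the proofs are below) =====
def Claim_equal_solution : Prop := ∀ (s : String), Dom_solution s → Pre_solution s → Spec_solution s (solution s)

-- ===== LEMMAS AND PROOFS =====

-- the body of A's loop, as a named function (definitionally equal to the fold in `solution`)
def pvStep (answer : List Int) (l : List Int) : List Int :=
  answer ++ [PySem.List.pyGetD (PySem.Set.diff (PySem.Set.ofList l) (PySem.Set.ofList answer)) 0 0]

-- a set one element larger than a subset: the difference is that one element
theorem pv_diff_singleton (st sa : List Int) (hst : st.Nodup) (hsa : sa.Nodup)
    (hsub : ∀ x ∈ sa, x ∈ st) (hlen : st.length = sa.length + 1) :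
    ∃ a, PySem.Set.diff st sa = [a] ∧ a ∈ st ∧ a ∉ sa ∧ (∀ x, x ∈ st → x ∉ sa → x = a) := by
  have hmemdiff : ∀ x, x ∈ PySem.Set.diff st sa ↔ (x ∈ st ∧ x ∉ sa) := by
    intro x
    simp [PySem.Set.diff, List.mem_filter, PySem.Set.contains]
  have hfil : List.Perm (st.filter (fun x => decide (x ∈ sa))) sa := by
    apply (List.perm_ext_iff_of_nodup (hst.filter _) hsa).mpr
    intro a
    simp only [List.mem_filter, decide_eq_true_eq]
    exact ⟨fun h => h.2, fun h => ⟨hsub a h, h⟩⟩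
  have hclen : (st.filter (fun x => decide (x ∈ sa))).length = sa.length := hfil.length_eq
  have hdlen : (PySem.Set.diff st sa).length = 1 := by
    have := List.length_eq_countP_add_countP (fun x => decide (x ∈ sa)) (l := st)
    have hd : (PySem.Set.diff st sa).length = st.countP (fun x => !decide (x ∈ sa)) := by
      simp [PySem.Set.diff, PySem.Set.contains, List.countP_eq_length_filter]
    rw [List.countP_eq_length_filter] at this
    rw [hd]
    have : st.length = sa.length + st.countP (fun a => !decide (a ∈ sa)) := by
      simpa [hclen] using this
    omega
  obtain ⟨a, ha⟩ := List.length_eq_one_iff.mp hdlen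
  refine ⟨a, ha, ?_, ?_, ?_⟩
  · have := (hmemdiff a).mp (ha ▸ List.mem_singleton_self a); exact this.1
  · have := (hmemdiff a).mp (ha ▸ List.mem_singleton_self a); exact this.2
  · intro x hx hxn
    have : x ∈ PySem.Set.diff st sa := (hmemdiff x).mpr ⟨hx, hxn⟩
    rw [ha] at this
    simpa using this

-- A's peeling loop: under the chain/cardinality hypotheses it appends, at each
-- step, the one element of the current set not seen before; the prefixes of the
-- result enumerate the sets.
theorem pv_peel (L : List (List Int)) (ans : List Int)
    (hnd : ans.Nodup)
    (hcard : ∀ k, (h : k < L.length) → (PySem.Set.ofList (L[k])).length = ans.length + k + 1)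
    (hmem : ∀ l ∈ L, ∀ x ∈ ans, x ∈ l)
    (hchain : ∀ k, (h : k < L.length) → ∀ j, (hj : j ≤ k) → ∀ x, x ∈ L[j]'(by omega) → x ∈ L[k]) :
    ∃ d, L.foldl pvStep ans = ans ++ d ∧ d.length = L.length ∧ (ans ++ d).Nodup ∧
      (∀ k, (h : k < L.length) → ∀ x, (x ∈ ans ∨ x ∈ d.take (k+1)) ↔ x ∈ L[k]) := by
  induction L generalizing ans with
  | nil => exact ⟨[], by simp, by simp, by simpa using hnd, by simp⟩
  | cons l L ih =>
    -- the head set and the one new element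
    have hst : (PySem.Set.ofList l).Nodup := PySem.Set.nodup_ofList l
    have hlen0 : (PySem.Set.ofList l).length = ans.length + 1 := by
      simpa using hcard 0 (by simp)
    obtain ⟨a, hdiff, ha_st, ha_not, huniq⟩ :=
      pv_diff_singleton (PySem.Set.ofList l) ans hst hnd
        (fun x hx => (PySem.Set.mem_ofList l x).mpr (hmem l (by simp) x hx)) hlen0
    have hstep : pvStep ans l = ans ++ [a] := by
      have hsa : PySem.Set.ofList ans = ans := PySem.Set.ofList_eq_self_of_nodup ans hnd
      rw [pvStep, hsa, hdiff, PySem.List.pyGetD_zero_cons]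
    have ha_mem : a ∈ l := (PySem.Set.mem_ofList l a).mp ha_st
    have hnd' : (ans ++ [a]).Nodup := by
      rw [List.nodup_append]
      refine ⟨hnd, by simp, ?_⟩
      intro y hy z hz
      simp only [List.mem_singleton] at hz
      subst hz
      exact fun h => ha_not (h ▸ hy)
    obtain ⟨d, hfold, hdlen, hndall, hchar⟩ := ih (ans ++ [a]) hnd'
      (fun k h => by
        have := hcard (k + 1) (by simpa using Nat.succ_lt_succ h)
        simpa [Nat.add_comm, Nat.add_assoc, Nat.add_left_comm] using this)
      (fun l' hl' x hx => by
        rcases List.mem_append.mp hx with hxa | hxa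
        · exact hmem l' (List.mem_cons_of_mem _ hl') x hxa
        · obtain ⟨k, hk, rfl⟩ := List.mem_iff_getElem.mp hl'
          have := hchain (k + 1) (by simpa using Nat.succ_lt_succ hk) 0 (Nat.zero_le _)
          simp only [List.getElem_cons_zero, List.getElem_cons_succ] at this
          have hxa' : x = a := by simpa using hxa
          exact hxa' ▸ this a ha_mem)
      (fun k h j hj x hx => by
        have := hchain (k + 1) (by simpa using Nat.succ_lt_succ h) (j + 1) (by omega) x
        simpa using this (by simpa using hx))
    refine ⟨a :: d, ?_, by simpa using hdlen, ?_, ?_⟩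
    · rw [List.foldl_cons, hstep, hfold, List.append_assoc]
      rfl
    · have : ans ++ a :: d = (ans ++ [a]) ++ d := by simp
      rw [this]; exact hndall
    · intro k h x
      cases k with
      | zero =>
        simp only [List.getElem_cons_zero, List.take_succ_cons, List.take_zero,
          List.mem_singleton]
        constructor
        · rintro (hx | rfl)
          · exact hmem l (by simp) x hx
          · exact ha_mem
        · intro hx
          by_cases hxa : x ∈ ans
          · exact Or.inl hxa
          · exact Or.inr (huniq x ((PySem.Set.mem_ofList l x).mpr hx) hxa)
      | succ k =>
        have := hchar k (by simpa using Nat.lt_of_succ_lt_succ h) x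
        simp only [List.getElem_cons_succ] at this ⊢
        rw [List.take_succ_cons]
        constructor
        · rintro (hx | hx)
          · exact this.mp (Or.inl (by simp [hx]))
          · rcases List.mem_cons.mp hx with rfl | hx
            · exact this.mp (Or.inl (by simp))
            · exact this.mp (Or.inr hx)
        · intro hx
          rcases this.mpr hx with hx' | hx'
          · rcases List.mem_append.mp hx' with h1 | h1
            · exact Or.inl h1
            · exact Or.inr (List.mem_cons.mpr (Or.inl (by simpa using h1)))
          · exact Or.inr (List.mem_cons.mpr (Or.inr hx'))

-- counting an element in the concatenation of deduplicated lists counts the lists containing it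
theorem pv_count_flatMap_dedup (M : List (List Int)) (x : Int) :
    (M.flatMap PySem.List.dedup).count x = M.countP (fun l => decide (x ∈ l)) := by
  induction M with
  | nil => rfl
  | cons l M ih =>
    rw [List.flatMap_cons, List.count_append, List.countP_cons, ih]
    by_cases hx : x ∈ l
    · rw [List.count_eq_one_of_mem (PySem.List.nodup_dedup l) ((PySem.List.mem_dedup l x).mpr hx)]
      simp [hx, Nat.add_comm]
    · rw [List.count_eq_zero_of_not_mem (fun h => hx ((PySem.List.mem_dedup l x).mp h))]
      simp [hx]

-- a predicate true exactly from position k on is satisfied length-minus-k times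
theorem pv_countP_tail {A : Type} (ys : List A) (p : A -> Bool) (k : Nat) (hk : k <= ys.length)
    (h : ∀ j, (hj : j < ys.length) → (p ys[j] = true ↔ k ≤ j)) :
    ys.countP p = ys.length - k := by
  conv_lhs => rw [← List.take_append_drop k ys]
  rw [List.countP_append]
  have h1 : (ys.take k).countP p = 0 := by
    rw [List.countP_eq_zero]
    intro a ha
    obtain ⟨i, hi, rfl⟩ := List.mem_iff_getElem.mp ha
    rw [List.getElem_take]
    have hik : i < k := lt_of_lt_of_le hi (List.length_take_le _ _)
    intro hp
    have := (h i (by simp at hi; omega)).mp hp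
    omega
  have h2 : (ys.drop k).countP p = (ys.drop k).length := by
    rw [List.countP_eq_length]
    intro a ha
    obtain ⟨i, hi, rfl⟩ := List.mem_iff_getElem.mp ha
    rw [List.getElem_drop]
    exact (h (k + i) (by simp at hi; omega)).mpr (by omega)
  rw [h1, h2]
  simp

-- the sorted token list of both ports, parsed (A's loop runs over exactly this)
def pvLs (toks : List String) : List (List Int) :=
  (PySem.List.sorted toks (fun t => PySem.Str.len t) false).map pvParse

-- the elements B counts: each token's parse, deduplicated, concatenated
def pvF (toks : List String) : List Int :=
  toks.flatMap (fun t => PySem.List.dedup (pvParse t))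

-- the token list both ports (and Pre_solution) start from
def pvToks (s : String) : List String :=
  (PySem.Str.split? (String.ofList (pvRStripBrace (pvLStripBrace s.toList))) "},{").getD []

theorem pv_solution_eq (s : String) : solution s = (pvLs (pvToks s)).foldl pvStep [] := rfl

theorem pv_solution_alt_eq (s : String) :
    solution_alt s = PySem.List.sorted (PySem.Dict.counter (pvF (pvToks s))).keys
      (fun x => -((PySem.Dict.counter (pvF (pvToks s))).getD x 0)) false := by
  rw [solution_alt]
  simp only [← PySem.Dict.foldl_insert_getD_add_one_eq_counter, pvF, pvToks,
    List.foldl_flatMap]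

-- the heart of the equivalence: under the chain/cardinality precondition, A's
-- peeling loop produces exactly the distinct counted elements in order of
-- strictly decreasing containment count, i.e. B's sorted output
theorem pv_core (toks : List String)
    (hcard : ∀ k, (h : k < (pvLs toks).length) →
      (PySem.Set.ofList ((pvLs toks)[k])).length = k + 1)
    (hchain : ∀ k, (h : k < (pvLs toks).length) → ∀ j, (hj : j ≤ k) → ∀ x,
      x ∈ (pvLs toks)[j]'(by omega) → x ∈ (pvLs toks)[k]) :
    (pvLs toks).foldl pvStep [] =
      PySem.List.sorted (PySem.Dict.counter (pvF toks)).keys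
        (fun x => -((PySem.Dict.counter (pvF toks)).getD x 0)) false := by
  obtain ⟨d, hfold, hdlen, hndd, hchar⟩ :=
    pv_peel (pvLs toks) [] (by simp) (by simpa using hcard) (by simp) hchain
  simp only [List.nil_append] at hfold hndd
  have hchar' : ∀ k, (h : k < (pvLs toks).length) → ∀ x,
      x ∈ d.take (k+1) ↔ x ∈ (pvLs toks)[k] := by
    intro k h x
    simpa using hchar k h x
  -- membership of d's element at index i in the k-th set is exactly i ≤ k
  have hidx : ∀ i, (hi : i < d.length) → ∀ j, (hj : j < (pvLs toks).length) →
      (d[i] ∈ (pvLs toks)[j] ↔ i ≤ j) := by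
    intro i hi j hj
    rw [← hchar' j hj]
    constructor
    · intro hmem
      obtain ⟨k, hk, hk2⟩ := List.mem_iff_getElem.mp hmem
      have hk' : k < d.length := lt_of_lt_of_le hk (by simp)
      rw [List.getElem_take] at hk2
      have := (List.Nodup.getElem_inj_iff hndd).mp hk2
      have hkj : k < j + 1 := by
        have := hk
        simp only [List.length_take] at this
        omega
      omega
    · intro hij
      exact List.mem_iff_getElem.mpr ⟨i, by simp [List.length_take]; omega,
        by rw [List.getElem_take]⟩
  -- the element placed at position i lies in exactly the sets from i on
  have hcount : ∀ i, (hi : i < d.length) →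
      (pvF toks).count (d[i]) = (pvLs toks).length - i := by
    intro i hi
    have hFM : pvF toks = (toks.map pvParse).flatMap PySem.List.dedup := by
      rw [pvF, List.flatMap_map]
    rw [hFM, pv_count_flatMap_dedup]
    have hperm : (pvLs toks).Perm (toks.map pvParse) :=
      (PySem.List.sorted_perm toks (fun t => PySem.Str.len t) false).map pvParse
    rw [← hperm.countP_eq]
    exact pv_countP_tail (pvLs toks) _ i (by omega)
      (fun j hj => by simpa using hidx i hi j hj)
  rw [hfold]
  rw [PySem.Dict.keys_counter]
  have hkey : (fun x : Int => -((PySem.Dict.counter (pvF toks)).getD x 0)) =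
      (fun x : Int => -(((pvF toks).count x : Int))) := funext fun x => by
    rw [PySem.Dict.getD_counter]
  rw [hkey]
  refine (PySem.List.sorted_eq_of_perm_of_pairwise_lt _ _ _ ?_ ?_).symm
  · -- d is a permutation of the distinct counted elements
    refine (List.perm_ext_iff_of_nodup hndd (PySem.Set.nodup_ofList _)).mpr ?_
    intro x
    rw [PySem.Set.mem_ofList, pvF, List.mem_flatMap]
    constructor
    · intro hx
      obtain ⟨i, hi, rfl⟩ := List.mem_iff_getElem.mp hx
      have hiL : i < (pvLs toks).length := by omega
      have hmem : d[i] ∈ (pvLs toks)[i] := (hidx i hi i hiL).mpr le_rfl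
      refine ⟨(PySem.List.sorted toks (fun t => PySem.Str.len t) false)[i]'(by
        simpa [pvLs] using hiL), ?_, ?_⟩
      · exact (PySem.List.mem_sorted _ _ _ _).mp (List.getElem_mem _)
      · rw [PySem.List.mem_dedup]
        simpa [pvLs] using hmem
    · rintro ⟨t, ht, hx⟩
      rw [PySem.List.mem_dedup] at hx
      have ht' : t ∈ PySem.List.sorted toks (fun t => PySem.Str.len t) false :=
        (PySem.List.mem_sorted _ _ _ _).mpr ht
      obtain ⟨j, hj, rfl⟩ := List.mem_iff_getElem.mp ht'
      have hjL : j < (pvLs toks).length := by simp only [pvLs, List.length_map]; exact hj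
      have hxj : x ∈ (pvLs toks)[j] := by
        simp only [pvLs, List.getElem_map]; exact hx
      exact List.mem_of_mem_take ((hchar' j hjL x).mpr hxj)
  · -- strictly decreasing counts along d
    rw [List.pairwise_iff_getElem]
    intro i j hi hj hij
    rw [hcount i hi, hcount j hj]
    have hjL : j < (pvLs toks).length := by omega
    simp only [neg_lt_neg_iff, Int.ofNat_lt]
    exact_mod_cast Nat.sub_lt_sub_left (by omega) hij

-- ===== VERDICT (by name: the statement is the Claim_ definition above) =====
theorem solution_spec : Claim_equal_solution := by
  intro s _ hpre
  unfold Spec_solution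
  obtain ⟨hparse, hcard, hchain⟩ := hpre
  rw [pv_solution_eq s, pv_solution_alt_eq s]
  refine pv_core (pvToks s) ?_ ?_
  · intro k h
    have := hcard k (by simpa [pvLs, pvToks] using h)
    simpa [pvLs, pvToks, List.getElem_map] using this
  · intro k h j hj x hx
    have := hchain k (by simpa [pvLs, pvToks] using h) j hj x
    simp only [List.getElem_map, PySem.Set.mem_ofList] at this
    simp only [pvLs, pvToks, List.getElem_map] at hx ⊢
    exact this hx
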